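-- pv_equiv track=rewrite | github.com/1orenzo/tp1_pdi_2025 | .venvPDI/TP_pdi/Problema 2/problema2_validacion_formulario.py | encontrar_centros_lineas
-- ===== SOURCE A (Python) =====
-- def encontrar_centros_lineas(arr_bool):
--     """Devuelve los centros de los picos detectados (Ayuda 1)."""
--     lineas = []
--     en_linea = False
--     inicio = 0
--     for i, val in enumerate(arr_bool):
--         if val and not en_linea:
--             inicio = i
--             en_linea = True
--         elif not val and en_linea:
--             lineas.append((inicio + i) // 2)
--             en_linea = False
--     if en_linea:
--         lineas.append((inicio + len(arr_bool)) // 2)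
--     return lineas
-- ===== SOURCE B (Python) =====
-- def encontrar_centros_lineas(arr_bool):
--     """Devuelve los centros de los picos detectados (Ayuda 1)."""
--     vals = [bool(v) for v in arr_bool]
--     starts = [i for i, (prev, cur) in enumerate(zip([False] + vals, vals))
--               if cur and not prev]
--     ends = [i + 1 for i, (cur, nxt) in enumerate(zip(vals, vals[1:] + [False]))
--             if cur and not nxt]
--     return [(s + e) // 2 for s, e in zip(starts, ends)]
-- ===== Notes on version B (the rewrite author's own statement) =====
-- stated objective: alternative
-- what changed: Replaces A's single stateful scan (en_linea flag, inicio, trailing fixup) by staged vectorized-style passes: rising edges and falling edges are each found by comparing the array with a shifted copy via zip comprehensions, then starts and ends are paired with zip and mapped to midpoints.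
import Mathlib
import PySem

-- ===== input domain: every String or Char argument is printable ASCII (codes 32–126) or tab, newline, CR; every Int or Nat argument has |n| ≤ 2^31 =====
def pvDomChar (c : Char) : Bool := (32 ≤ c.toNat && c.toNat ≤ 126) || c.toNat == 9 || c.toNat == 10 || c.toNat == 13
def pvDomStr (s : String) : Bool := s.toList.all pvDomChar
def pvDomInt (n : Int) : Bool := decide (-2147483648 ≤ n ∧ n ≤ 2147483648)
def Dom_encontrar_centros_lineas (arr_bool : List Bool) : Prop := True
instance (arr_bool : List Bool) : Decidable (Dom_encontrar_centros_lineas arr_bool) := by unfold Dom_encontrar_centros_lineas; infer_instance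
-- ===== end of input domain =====

-- B replaces A's single stateful scan by staged passes: rising/falling edges found by zip-with-shifted-copy comprehensions, then starts paired with ends and mapped to midpoints; objective: alternative, same cost.


-- ===== PORT A =====
-- loop body of A's for: state = (lineas, en_linea, inicio), item = (i, val)
def pvStepA (st : List Int × Bool × Int) (iv : Int × Bool) : List Int × Bool × Int :=
  if iv.2 && !st.2.1 then (st.1, true, iv.1)
  else if !iv.2 && st.2.1 then (st.1 ++ [PySem.Int.floordiv (st.2.2 + iv.1) 2], false, st.2.2)
  else st

-- A's code after the for-loop: the trailing-run fixup
def pvFinA (N : Int) (st : List Int × Bool × Int) : List Int :=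
  if st.2.1 then st.1 ++ [PySem.Int.floordiv (st.2.2 + N) 2] else st.1

def encontrar_centros_lineas (arr_bool : List Bool) : List Int :=
  pvFinA (arr_bool.length : Int) ((PySem.List.enumerate arr_bool 0).foldl pvStepA ([], false, 0))

-- ===== PORT B =====
-- Source B's three comprehensions: vals is arr_bool itself (already Bool);
-- starts = [i for i,(prev,cur) in enumerate(zip([False]+vals, vals)) if cur and not prev]
-- ends   = [i+1 for i,(cur,nxt) in enumerate(zip(vals, vals[1:]+[False])) if cur and not nxt]
-- return [(s+e)//2 for s,e in zip(starts, ends)]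
def encontrar_centros_lineas_alt (arr_bool : List Bool) : List Int :=
  let starts := (PySem.List.enumerate ((false :: arr_bool).zip arr_bool) 0).filterMap
      (fun p => if p.2.2 && !p.2.1 then some p.1 else none)
  let ends := (PySem.List.enumerate (arr_bool.zip (arr_bool.drop 1 ++ [false])) 0).filterMap
      (fun p => if p.2.1 && !p.2.2 then some (p.1 + 1) else none)
  (starts.zip ends).map (fun p => PySem.Int.floordiv (p.1 + p.2) 2)

-- ===== PRECONDITION & SPEC =====
def Spec_encontrar_centros_lineas (arr_bool : List Bool) (out : List Int) : Prop := out = encontrar_centros_lineas_alt arr_bool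
instance (arr_bool : List Bool) (out : List Int) : Decidable (Spec_encontrar_centros_lineas arr_bool out) := by unfold Spec_encontrar_centros_lineas; infer_instance

-- ===== CLAIM (what is proved, stated in full; the proofs are below) =====
def Claim_equal_encontrar_centros_lineas : Prop := ∀ (arr_bool : List Bool), Dom_encontrar_centros_lineas arr_bool → Spec_encontrar_centros_lineas arr_bool (encontrar_centros_lineas arr_bool)

-- ===== LEMMAS AND PROOFS =====

-- Common reference function: centers of maximal True runs, run by run.
def pvRuns : List Bool → Int → List Int
  | [], _ => []
  | false :: rest, pos => pvRuns rest (pos + 1)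
  | true :: rest, pos =>
    let L : Int := 1 + ((rest.takeWhile (· == true)).length : Int)
    PySem.Int.floordiv (pos + (pos + L)) 2 :: pvRuns (rest.dropWhile (· == true)) (pos + L)
termination_by arr _ => arr.length
decreasing_by all_goals (simp; try exact List.length_dropWhile_le _ _)

-- A's behaviour while inside a run that started at index ini
def pvInRun (ini : Int) : List Bool → Int → List Int
  | [], pos => [PySem.Int.floordiv (ini + pos) 2]
  | true :: rest, pos => pvInRun ini rest (pos + 1)
  | false :: rest, pos => PySem.Int.floordiv (ini + pos) 2 :: pvRuns rest (pos + 1)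

theorem pvInRun_eq (arr : List Bool) : ∀ (ini pos : Int),
    pvInRun ini arr pos =
      PySem.Int.floordiv (ini + (pos + ((arr.takeWhile (· == true)).length : Int))) 2 ::
        pvRuns (arr.dropWhile (· == true)) (pos + ((arr.takeWhile (· == true)).length : Int)) := by
  induction arr with
  | nil => intro ini pos; simp [pvInRun, pvRuns]
  | cons v rest ih =>
    intro ini pos
    cases v with
    | true =>
      simp [pvInRun, ih, List.takeWhile, List.dropWhile]
      constructor <;> · congr 1; ring
    | false =>
      simp [pvInRun, pvRuns, List.takeWhile, List.dropWhile]

theorem pvMain (arr : List Bool) : ∀ (pos : Int) (acc : List Int) (ini : Int),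
    (pvFinA (pos + (arr.length : Int)) ((PySem.List.enumerate arr pos).foldl pvStepA (acc, false, ini))
        = acc ++ pvRuns arr pos)
    ∧ (pvFinA (pos + (arr.length : Int)) ((PySem.List.enumerate arr pos).foldl pvStepA (acc, true, ini))
        = acc ++ pvInRun ini arr pos) := by
  induction arr with
  | nil => intro pos acc ini; simp [pvFinA, pvRuns, pvInRun]
  | cons v rest ih =>
    intro pos acc ini
    have hlen : pos + ((rest.length + 1 : Nat) : Int) = (pos + 1) + (rest.length : Int) := by
      push_cast; ring
    constructor
    · cases v with
      | true =>
        have h := (ih (pos + 1) acc pos).2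
        rw [pvInRun_eq] at h
        simp only [PySem.List.enumerate_cons, List.foldl_cons, List.length_cons, hlen, pvStepA]
        simp [add_assoc] at h
        simp [pvRuns, add_assoc, h]
      | false =>
        have h := (ih (pos + 1) acc ini).1
        simp only [PySem.List.enumerate_cons, List.foldl_cons, List.length_cons, hlen, pvStepA]
        simp [pvRuns, h]
    · cases v with
      | true =>
        have h := (ih (pos + 1) acc ini).2
        simp only [PySem.List.enumerate_cons, List.foldl_cons, List.length_cons, hlen, pvStepA]
        simp [pvInRun, h]
      | false =>
        have h := (ih (pos + 1) (acc ++ [PySem.Int.floordiv (ini + pos) 2]) ini).1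
        simp only [PySem.List.enumerate_cons, List.foldl_cons, List.length_cons, hlen, pvStepA]
        simp at h
        simp [pvInRun, h]

-- Recursive characterizations of B's three comprehensions.
def pvS (prev : Bool) : List Bool → Int → List Int
  | [], _ => []
  | a :: r, pos => if a && !prev then pos :: pvS a r (pos + 1) else pvS a r (pos + 1)

def pvE : List Bool → Int → List Int
  | [], _ => []
  | a :: r, pos => if a && !(r.headD false) then (pos + 1) :: pvE r (pos + 1) else pvE r (pos + 1)

def pvC (ss es : List Int) : List Int :=
  (ss.zip es).map (fun p => PySem.Int.floordiv (p.1 + p.2) 2)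

theorem pvS_eq (arr : List Bool) : ∀ (prev : Bool) (pos : Int),
    (PySem.List.enumerate ((prev :: arr).zip arr) pos).filterMap
      (fun p => if p.2.2 && !p.2.1 then some p.1 else none) = pvS prev arr pos := by
  induction arr with
  | nil => intro prev pos; simp [pvS]
  | cons a r ih =>
    intro prev pos
    cases a <;> cases prev <;>
      simpa [pvS, List.zip_cons_cons, PySem.List.enumerate_cons] using ih _ (pos + 1)

theorem pvE_eq (arr : List Bool) : ∀ (pos : Int),
    (PySem.List.enumerate (arr.zip (arr.drop 1 ++ [false])) pos).filterMap
      (fun p => if p.2.1 && !p.2.2 then some (p.1 + 1) else none) = pvE arr pos := by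
  induction arr with
  | nil => intro pos; simp [pvE]
  | cons a r ih =>
    intro pos
    cases r with
    | nil => simp [pvE]; by_cases h : a <;> simp [h]
    | cons b r' =>
      have h := ih (pos + 1)
      simp only [List.drop_succ_cons, List.drop_zero] at h
      cases a <;> cases b <;>
        simpa [pvE, List.headD, List.cons_append, List.zip_cons_cons,
          PySem.List.enumerate_cons] using h

-- The edge-zip pairing equals the run-by-run reference (joint with the pending-run form).
theorem pvCSE (arr : List Bool) :
    (∀ pos : Int, pvC (pvS false arr pos) (pvE arr pos) = pvRuns arr pos)
    ∧ (∀ (pos s : Int), pvC (s :: pvS true arr (pos + 1)) (pvE (true :: arr) pos) = pvInRun s arr (pos + 1)) := by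
  induction arr with
  | nil =>
    constructor
    · intro pos; simp [pvS, pvE, pvC, pvRuns]
    · intro pos s; simp [pvS, pvE, pvC, pvInRun, List.headD]
  | cons a r ih =>
    constructor
    · intro pos
      cases a with
      | false =>
        have h := ih.1 (pos + 1)
        simp only [pvS, pvE, List.headD]
        simpa [pvRuns] using h
      | true =>
        have h := ih.2 pos pos
        simp only [pvS, Bool.not_false, Bool.and_true] at h ⊢
        -- pvRuns (true :: r) pos = pvInRun pos r (pos + 1)
        rw [show pvRuns (true :: r) pos = pvInRun pos r (pos + 1) by
          rw [pvInRun_eq]; simp [pvRuns]; constructor <;> · congr 1; ring]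
        simpa using h
    · intro pos s
      cases a with
      | false =>
        have h := ih.1 (pos + 1 + 1)
        simpa [pvS, pvE, pvC, pvInRun, List.headD] using h
      | true =>
        have h := ih.2 (pos + 1) s
        simpa [pvS, pvE, pvInRun, List.headD] using h

-- ===== VERDICT (by name: the statement is the Claim_ definition above) =====
theorem encontrar_centros_lineas_spec : Claim_equal_encontrar_centros_lineas := by
  intro arr _
  unfold Spec_encontrar_centros_lineas encontrar_centros_lineas encontrar_centros_lineas_alt
  have hA := (pvMain arr 0 [] 0).1
  simp only [zero_add] at hA
  rw [hA, pvS_eq, pvE_eq]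
  exact (pvCSE arr).1 0 |>.symm
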